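-- pv_equiv track=rewrite | github.com/ProgrammerApasionated/Program-I | PrimerSemestreProgramación/EjerciciosFinales/TercerExamen/ExamenFinal3.py | panel_mas_rentable
-- ===== SOURCE A (Python) =====
-- def panel_mas_rentable(matrix):
--     # Queremos calcular el panel con el total de energía mayor (fila con el mayor sumatorio).
--     fila     = len (matrix)
--     columna  = len (matrix[0])
--     max_total = None
--     panel_max = None
--     for panel in range(fila):
--         total_panel = 0
--         for dia in range(columna):
--             total_panel += matrix[panel][dia]
--         if max_total is None or max_total < total_panel:
--             max_total = total_panel
--             panel_max = panel
--     print (f"El panel con el máximo total es el {panel_max} con un total de {max_total}")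
--     return panel_max
-- ===== SOURCE B (Python) =====
-- def panel_mas_rentable(matrix):
--     # Column-major accumulation: fold each day's column into a running totals vector,
--     # then take the first index of the maximum.
--     totales = [0] * len(matrix)
--     for dia in range(len(matrix[0])):
--         for panel in range(len(matrix)):
--             totales[panel] += matrix[panel][dia]
--     max_total = max(totales)
--     panel_max = totales.index(max_total)
--     print(f"El panel con el máximo total es el {panel_max} con un total de {max_total}")
--     return panel_max
-- ===== Notes on version B (the rewrite author's own statement) =====
-- stated objective: alternative
-- what changed: Transposed traversal: instead of A's row-major sum-and-running-max in one loop, B accumulates column by column into a totals vector (outer loop over days, inner over panels), then picks the first argmax via totales.index(max(totales)); correct because addition is commutative so summation order does not matter.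
import Mathlib
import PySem

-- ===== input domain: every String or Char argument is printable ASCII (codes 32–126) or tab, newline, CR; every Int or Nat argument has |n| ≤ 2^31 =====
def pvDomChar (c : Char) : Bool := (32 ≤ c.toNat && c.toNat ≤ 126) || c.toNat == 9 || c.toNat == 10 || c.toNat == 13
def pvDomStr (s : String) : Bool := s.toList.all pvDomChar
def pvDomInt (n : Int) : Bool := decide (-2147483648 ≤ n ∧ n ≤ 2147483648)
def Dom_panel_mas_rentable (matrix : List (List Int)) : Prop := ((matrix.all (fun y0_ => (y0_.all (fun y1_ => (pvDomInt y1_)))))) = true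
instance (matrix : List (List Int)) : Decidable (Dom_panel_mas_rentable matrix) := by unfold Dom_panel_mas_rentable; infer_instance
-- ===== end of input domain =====

-- B traverses the matrix column-major (accumulating a totals vector day by day) instead of
-- A's row-major running-max loop, then returns the first index of the maximal total; same cost.

-- ===== PORT A =====
-- inner loop: for dia in range(columna): total_panel += matrix[panel][dia]
def pvInnerA (row : List Int) (columna : Nat) : Int :=
  (List.range columna).foldl (fun acc d => acc + PySem.List.pyGetD row (Int.ofNat d) 0) 0

def panel_mas_rentable (matrix : List (List Int)) : Int :=
  let fila := matrix.length
  let columna := (PySem.List.pyGetD matrix 0 []).length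
  let st :=
    (List.range fila).foldl
      (fun (st : Option Int × Option Int) panel =>
        let total_panel := pvInnerA (PySem.List.pyGetD matrix (Int.ofNat panel) []) columna
        match st.1 with
        | none => (some total_panel, some (Int.ofNat panel))
        | some m =>
          if m < total_panel then (some total_panel, some (Int.ofNat panel)) else st)
      (none, none)
  st.2.getD 0  -- under Pre_ the loop ran at least once, so panel_max is some

-- ===== PORT B =====
def panel_mas_rentable_alt (matrix : List (List Int)) : Int :=
  let totales0 : List Int := List.replicate matrix.length 0
  let totales :=
    (List.range (PySem.List.pyGetD matrix 0 []).length).foldl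
      (fun t dia =>
        (List.range matrix.length).foldl
          (fun t panel =>
            PySem.List.pySetD t (Int.ofNat panel)
              (PySem.List.pyGetD t (Int.ofNat panel) 0 +
               PySem.List.pyGetD (PySem.List.pyGetD matrix (Int.ofNat panel) []) (Int.ofNat dia) 0))
          t)
      totales0
  let max_total := (PySem.List.max? totales (fun x => x)).getD 0
  let panel_max := (PySem.List.index? totales max_total).getD 0
  (panel_max : Int)

-- ===== PRECONDITION & SPEC =====
-- Pre_ excludes exactly the inputs where A raises IndexError: the empty matrix
-- (matrix[0]) and jagged matrices with a row shorter than the first row (matrix[panel][dia]).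
def Pre_panel_mas_rentable (matrix : List (List Int)) : Prop :=
  matrix ≠ [] ∧ ∀ row ∈ matrix, (matrix.headD []).length ≤ row.length
instance (matrix : List (List Int)) : Decidable (Pre_panel_mas_rentable matrix) := by
  unfold Pre_panel_mas_rentable; infer_instance

def pvWitness_panel_mas_rentable : List (List Int) := [[1, 2], [3, 0], [2, 2]]

def Spec_panel_mas_rentable (matrix : List (List Int)) (out : Int) : Prop := out = panel_mas_rentable_alt matrix
instance (matrix : List (List Int)) (out : Int) : Decidable (Spec_panel_mas_rentable matrix out) := by unfold Spec_panel_mas_rentable; infer_instance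

-- ===== CLAIM (what is proved, stated in full; the proofs are below) =====
def Claim_equal_panel_mas_rentable : Prop := ∀ (matrix : List (List Int)), Dom_panel_mas_rentable matrix → Pre_panel_mas_rentable matrix → Spec_panel_mas_rentable matrix (panel_mas_rentable matrix)

-- ===== LEMMAS AND PROOFS =====

-- A's outer step, abstracted over the per-row totals function g
def pvStepA (g : Nat → Int) (st : Option Int × Option Int) (p : Nat) : Option Int × Option Int :=
  match st.1 with
  | none => (some (g p), some (Int.ofNat p))
  | some m => if m < g p then (some (g p), some (Int.ofNat p)) else st

-- A's fold computes the FIRST argmax of g on range k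
lemma pv_foldA_char (g : Nat → Int) :
    ∀ k, 0 < k → ∃ j, j < k ∧
      (List.range k).foldl (pvStepA g) (none, none) = (some (g j), some (Int.ofNat j)) ∧
      (∀ i, i < j → g i < g j) ∧ (∀ i, i < k → g i ≤ g j) := by
  intro k hk
  induction k with
  | zero => omega
  | succ n ih =>
    rcases Nat.eq_zero_or_pos n with hn | hn
    · subst hn
      exact ⟨0, by omega, by simp [pvStepA], by omega, by
        intro i hi; interval_cases i; rfl⟩
    · obtain ⟨j, hjk, hfold, hfirst, hmax⟩ := ih hn
      rw [List.range_succ, List.foldl_append]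
      rw [hfold]
      simp only [List.foldl_cons, List.foldl_nil, pvStepA]
      by_cases hlt : g j < g n
      · refine ⟨n, by omega, by simp [hlt], ?_, ?_⟩
        · intro i hi; exact lt_of_le_of_lt (hmax i hi) hlt
        · intro i hi
          rcases Nat.lt_or_ge i n with h | h
          · exact le_of_lt (lt_of_le_of_lt (hmax i h) hlt)
          · have : i = n := by omega
            subst this; exact le_refl _
      · refine ⟨j, by omega, by simp [hlt], hfirst, ?_⟩
        intro i hi
        rcases Nat.lt_or_ge i n with h | h
        · exact hmax i h
        · have : i = n := by omega
          subst this; omega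

-- B's inner loop (one day): pointwise effect on the totals vector
lemma pv_inner_day (n : Nat) (f : Nat → Int) :
    ∀ (t : List Int), t.length = n →
      ((List.range n).foldl (fun t p => t.set p (t.getD p 0 + f p)) t).length = n ∧
      ∀ q, ((List.range n).foldl (fun t p => t.set p (t.getD p 0 + f p)) t).getD q 0
            = if q < n then t.getD q 0 + f q else t.getD q 0 := by
  -- fold over range k, with k ≤ n, updates exactly the first k entries
  suffices h : ∀ k, k ≤ n → ∀ (t : List Int), t.length = n →
      ((List.range k).foldl (fun t p => t.set p (t.getD p 0 + f p)) t).length = n ∧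
      ∀ q, ((List.range k).foldl (fun t p => t.set p (t.getD p 0 + f p)) t).getD q 0
            = if q < k then t.getD q 0 + f q else t.getD q 0 by
    intro t ht; exact h n le_rfl t ht
  intro k hk
  induction k with
  | zero => intro t ht; exact ⟨ht, by simp⟩
  | succ m ih =>
    intro t ht
    obtain ⟨hlen, hpt⟩ := ih (by omega) t ht
    rw [List.range_succ, List.foldl_append]
    simp only [List.foldl_cons, List.foldl_nil]
    set u := (List.range m).foldl (fun t p => t.set p (t.getD p 0 + f p)) t with hu
    constructor
    · simp [List.length_set, hlen]
    · intro q
      have hmn : m < u.length := by omega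
      by_cases hq : q = m
      · subst hq
        rw [List.getD_eq_getElem _ _ (by simp [List.length_set]; omega)]
        rw [List.getElem_set_self]
        have := hpt q
        rw [if_neg (lt_irrefl q)] at this
        rw [this, if_pos (Nat.lt_succ_self q)]
      · have hget : (u.set m (u.getD m 0 + f m)).getD q 0 = u.getD q 0 := by
          by_cases hql : q < u.length
          · rw [List.getD_eq_getElem _ _ (by simp [List.length_set]; omega),
                List.getD_eq_getElem _ _ hql]
            rw [List.getElem_set_ne (by omega)]
          · rw [List.getD_eq_default _ _ (by simp [List.length_set]; omega),
                List.getD_eq_default _ _ (by omega)]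
        rw [hget, hpt q]
        rcases Nat.lt_trichotomy q m with h | h | h
        · rw [if_pos h, if_pos (by omega)]
        · exact absurd h hq
        · rw [if_neg (by omega), if_neg (by omega)]

-- B's totals vector after all days equals A's per-row sums, pointwise
lemma pv_totales (matrix : List (List Int)) :
    ∀ c, (((List.range c).foldl
      (fun t dia =>
        (List.range matrix.length).foldl
          (fun t panel =>
            PySem.List.pySetD t (Int.ofNat panel)
              (PySem.List.pyGetD t (Int.ofNat panel) 0 +
               PySem.List.pyGetD (PySem.List.pyGetD matrix (Int.ofNat panel) []) (Int.ofNat dia) 0))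
          t)
      (List.replicate matrix.length (0:Int))).length = matrix.length) ∧
      ∀ q, ((List.range c).foldl
      (fun t dia =>
        (List.range matrix.length).foldl
          (fun t panel =>
            PySem.List.pySetD t (Int.ofNat panel)
              (PySem.List.pyGetD t (Int.ofNat panel) 0 +
               PySem.List.pyGetD (PySem.List.pyGetD matrix (Int.ofNat panel) []) (Int.ofNat dia) 0))
          t)
      (List.replicate matrix.length (0:Int))).getD q 0
        = if q < matrix.length then pvInnerA (PySem.List.pyGetD matrix (Int.ofNat q) []) c else 0 := by
  intro c
  induction c with
  | zero => simp [pvInnerA]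
  | succ m ih =>
    obtain ⟨hlen, hpt⟩ := ih
    rw [List.range_succ, List.foldl_append]
    simp only [List.foldl_cons, List.foldl_nil]
    set u := (List.range m).foldl _ (List.replicate matrix.length (0:Int)) with hu
    have hstep : (List.range matrix.length).foldl
        (fun t panel =>
          PySem.List.pySetD t (Int.ofNat panel)
            (PySem.List.pyGetD t (Int.ofNat panel) 0 +
             PySem.List.pyGetD (PySem.List.pyGetD matrix (Int.ofNat panel) []) (Int.ofNat m) 0))
        u
      = (List.range matrix.length).foldl
        (fun t p => t.set p (t.getD p 0 +
             PySem.List.pyGetD (PySem.List.pyGetD matrix (Int.ofNat p) []) (Int.ofNat m) 0)) u := by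
      apply PySem.List.foldl_congr_mem
      intro acc p _
      simp [PySem.List.pySetD_natCast, PySem.List.pyGetD_natCast]
    rw [hstep]
    obtain ⟨hlen', hpt'⟩ := pv_inner_day matrix.length
      (fun p => PySem.List.pyGetD (PySem.List.pyGetD matrix (Int.ofNat p) []) (Int.ofNat m) 0) u hlen
    refine ⟨hlen', ?_⟩
    intro q
    rw [hpt' q, hpt q]
    by_cases hq : q < matrix.length
    · simp only [if_pos hq]
      unfold pvInnerA
      rw [List.range_succ, List.foldl_append]
      simp
    · simp [hq]

-- forward direction of index?: a witness that is first makes index? return it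
lemma pv_index?_of_first {xs : List Int} {v : Int} {k : Nat} (hk : k < xs.length)
    (hv : xs[k] = v) (hfirst : ∀ i (hi : i < k), xs[i]'(by omega) ≠ v) :
    PySem.List.index? xs v = some k := by
  rw [PySem.List.index?_eq_some_iff]
  refine ⟨xs.take k, xs.drop (k + 1), ?_, by simp [List.length_take]; omega, ?_⟩
  · conv_lhs => rw [← List.take_append_drop k xs]
    rw [← List.getElem_cons_drop hk, hv]
  · intro hmem
    obtain ⟨i, hi, hgi⟩ := List.mem_iff_getElem.mp hmem
    have hilen : i < k := by simp [List.length_take] at hi; omega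
    rw [List.getElem_take] at hgi
    exact hfirst i hilen hgi

theorem panel_mas_rentable_spec : Claim_equal_panel_mas_rentable := by
  intro matrix _ hpre
  obtain ⟨hne, _⟩ := hpre
  unfold Spec_panel_mas_rentable panel_mas_rentable panel_mas_rentable_alt
  simp only []
  set c := (PySem.List.pyGetD matrix 0 []).length with hc
  set n := matrix.length with hn
  have hn0 : 0 < n := List.length_pos_iff.mpr hne
  set g : Nat → Int := fun p => pvInnerA (PySem.List.pyGetD matrix (Int.ofNat p) []) c with hg
  -- A side
  obtain ⟨j, hjn, hfold, hfirst, hmax⟩ := pv_foldA_char g n hn0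
  have hA : (List.range n).foldl
      (fun (st : Option Int × Option Int) panel =>
        let total_panel := pvInnerA (PySem.List.pyGetD matrix (Int.ofNat panel) []) c
        match st.1 with
        | none => (some total_panel, some (Int.ofNat panel))
        | some m => if m < total_panel then (some total_panel, some (Int.ofNat panel)) else st)
      (none, none)
      = (some (g j), some (Int.ofNat j)) := by
    rw [← hfold]
    apply PySem.List.foldl_congr_mem
    intro acc p _
    simp only [pvStepA, hg]
  rw [hA]
  -- B side
  obtain ⟨hlen, hpt⟩ := pv_totales matrix c
  set totales := (List.range c).foldl
      (fun t dia =>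
        (List.range n).foldl
          (fun t panel =>
            PySem.List.pySetD t (Int.ofNat panel)
              (PySem.List.pyGetD t (Int.ofNat panel) 0 +
               PySem.List.pyGetD (PySem.List.pyGetD matrix (Int.ofNat panel) []) (Int.ofNat dia) 0))
          t)
      (List.replicate n (0:Int)) with htot
  have hlen' : totales.length = n := by rw [hlen, hn]
  have hgetT : ∀ q (hq : q < totales.length), totales[q] = g q := by
    intro q hq
    have := hpt q
    rw [if_pos (by omega), List.getD_eq_getElem _ _ hq] at this
    exact this
  -- max? returns some value, equal to g j
  have hmax? : PySem.List.max? totales (fun x => x) = some (g j) := by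
    obtain ⟨v, hv⟩ := Option.isSome_iff_exists.mp
      (by rw [Option.isSome_iff_ne_none]
          intro h
          rw [PySem.List.max?_eq_none_iff] at h
          apply hne
          have : totales.length = 0 := by rw [h]; rfl
          omega : (PySem.List.max? totales (fun x => x)).isSome)
    have hvmem := PySem.List.max?_mem hv
    have hvmax := PySem.List.max?_isMax hv
    obtain ⟨i, hi, hgi⟩ := List.mem_iff_getElem.mp hvmem
    have hin' : i < n := by omega
    have hvle : v ≤ g j := by rw [← hgi, hgetT i hi]; exact hmax i hin'
    have hjle : g j ≤ v := by
      have hjl : j < totales.length := by omega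
      have : totales[j] ∈ totales := List.getElem_mem hjl
      have := hvmax _ this
      rwa [hgetT j hjl] at this
    rw [hv, le_antisymm hvle hjle]
  rw [hmax?]
  have hidx : PySem.List.index? totales (g j) = some j := by
    apply pv_index?_of_first (k := j) (by omega) (hgetT j (by omega))
    intro i hi
    rw [hgetT i (by omega)]
    exact ne_of_lt (hfirst i hi)
  simp only [Option.getD_some]
  rw [hidx]
  simp
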